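-- pv_equiv track=rewrite | github.com/DanielHarit/marvel-genetic-data-processor | utils.py | find_repeating_patterns
-- ===== SOURCE A (Python) =====
-- from typing import List, Dict, Tuple
--
-- def find_repeating_patterns(sequence: str, min_length: int = 2) -> List[Tuple[str, int]]:
--     """Find all repeating patterns in a sequence, incrementally increasing pattern length."""
--     patterns = []
--     length = min_length
--     found = True
--
--     while found and length <= len(sequence) // 2:
--         found = False
--         seen = set()
--         counts = {}
--
--         for i in range(len(sequence) - length + 1):
--             pattern = sequence[i:i + length]
--             if pattern in seen:
--                 continue
--             seen.add(pattern)
--             count = sequence.count(pattern)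
--             if count > 1:
--                 found = True
--                 patterns.append((pattern, count))
--
--         length += 1
--
--     return patterns
-- ===== SOURCE B (Python) =====
-- def find_repeating_patterns(sequence, min_length=2):
--     """Per length: group occurrence positions per substring in one dict pass,
--     derive the greedy non-overlapping count from each position list, and
--     concatenate the per-length results until a length yields none."""
--     n = len(sequence)
--
--     def repeats_at(length):
--         groups = {}
--         for i in range(n - length + 1):
--             groups.setdefault(sequence[i:i + length], []).append(i)
--         result = []
--         for pat, pos in groups.items():
--             count, nxt = 0, 0
--             for i in pos:
--                 if i >= nxt:
--                     count += 1
--                     nxt = i + length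
--             if count > 1:
--                 result.append((pat, count))
--         return result
--
--     out = []
--     for length in range(min_length, n // 2 + 1):
--         rep = repeats_at(length)
--         if not rep:
--             break
--         out.extend(rep)
--     return out
-- ===== Notes on version B (the rewrite author's own statement) =====
-- stated objective: alternative
-- what changed: Instead of A's per-position sequence.count rescan plus a seen-set and a found-flag threaded through a while loop, B makes one grouping pass per length (dict: substring -> list of occurrence positions), derives each greedy non-overlapping count afterwards from the position list, and concatenates per-length result lists in a for loop that breaks on the first empty one.
-- outside the precondition, e.g. on find_repeating_patterns('ab', -2): A returns [('', 3), ('', 3), ('', 3)], B returns [('', 5), ('', 3), ('', 3)]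
import Mathlib
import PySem

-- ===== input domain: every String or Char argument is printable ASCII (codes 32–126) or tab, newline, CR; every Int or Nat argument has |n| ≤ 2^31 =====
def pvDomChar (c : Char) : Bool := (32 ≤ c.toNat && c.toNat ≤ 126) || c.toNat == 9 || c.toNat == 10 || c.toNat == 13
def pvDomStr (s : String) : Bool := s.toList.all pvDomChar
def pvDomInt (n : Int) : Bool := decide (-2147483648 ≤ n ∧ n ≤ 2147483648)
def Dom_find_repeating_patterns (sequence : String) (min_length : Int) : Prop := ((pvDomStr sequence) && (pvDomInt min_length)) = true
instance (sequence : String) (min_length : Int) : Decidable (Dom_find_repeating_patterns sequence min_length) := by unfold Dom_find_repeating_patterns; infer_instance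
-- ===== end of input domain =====

-- B replaces A's per-position sequence.count rescan (plus seen-set and found-flag) by one
-- grouping pass per length (substring -> occurrence positions) whose greedy non-overlapping
-- counts are read off afterwards; objective: alternative algorithm.

-- ===== PORT A =====
-- the substring sequence[i:i+length] A slices out at position i
def fpKey (cs : List Char) (L : Int) (i : Int) : List Char :=
  PySem.List.slice cs (some i) (some (i + L))

-- body of A's inner 'for i in range(...)' loop; state = (found, seen, patterns)
def fpA_step (cs : List Char) (L : Int) (st : Bool × PySem.Set (List Char) × List (List Char × Int)) (i : Int) :
    Bool × PySem.Set (List Char) × List (List Char × Int) :=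
  let p := fpKey cs L i
  if PySem.Set.contains st.2.1 p then st
  else
    let seen := PySem.Set.add st.2.1 p
    let c : Int := (PySem.Chars.count cs p : Int)
    if 1 < c then (true, seen, st.2.2 ++ [(p, c)]) else (st.1, seen, st.2.2)

-- A's 'while found and length <= len(sequence) // 2' loop (fuel = number of remaining lengths)
def fpA_loop (cs : List Char) (half : Int) : Nat → Int → Bool → List (List Char × Int) → List (List Char × Int)
  | 0, _, _, pats => pats
  | fuel + 1, L, found, pats =>
    if found && decide (L ≤ half) then
      let r := (PySem.List.pyRange 0 ((cs.length : Int) - L + 1) 1).foldl (fpA_step cs L) (false, PySem.Set.empty, pats)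
      fpA_loop cs half fuel (L + 1) r.1 r.2.2
    else pats

def find_repeating_patterns (sequence : String) (min_length : Int) : List (String × Int) :=
  let cs := sequence.toList
  let half := PySem.Int.floordiv (cs.length : Int) 2
  (fpA_loop cs half (half - min_length + 1).toNat min_length true []).map (fun pc => (String.mk pc.1, pc.2))

-- ===== PORT B =====
-- groups.setdefault(sequence[i:i+length], []).append(i)
def fpGroup (cs : List Char) (L : Int) (d : PySem.Dict (List Char) (List Int)) (i : Int) :
    PySem.Dict (List Char) (List Int) :=
  let p := PySem.List.slice cs (some i) (some (i + L))
  d.insert p (d.getD p [] ++ [i])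

-- 'count, nxt = 0, 0; for i in pos: if i >= nxt: count += 1; nxt = i + length' — then count
def fpGreedy (L : Int) (pos : List Int) : Int :=
  (pos.foldl (fun st i => if st.2 ≤ i then (st.1 + 1, i + L) else st) ((0 : Int), (0 : Int))).1

-- B's helper repeats_at(length)
def fpRepeatsAt (cs : List Char) (L : Int) : List (List Char × Int) :=
  let d := (PySem.List.pyRange 0 ((cs.length : Int) - L + 1) 1).foldl (fpGroup cs L) PySem.Dict.empty
  d.items.foldl (fun res pv =>
    let c := fpGreedy L pv.2
    if 1 < c then res ++ [(pv.1, c)] else res) []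

-- 'for length in range(min_length, n // 2 + 1): rep = repeats_at(length); if not rep: break; out.extend(rep)'
-- as structural recursion on the number of remaining lengths in the range
def fpB_go (cs : List Char) : Nat → Int → List (List Char × Int)
  | 0, _ => []
  | fuel + 1, L =>
    let rep := fpRepeatsAt cs L
    if rep.isEmpty then [] else rep ++ fpB_go cs fuel (L + 1)

def find_repeating_patterns_alt (sequence : String) (min_length : Int) : List (String × Int) :=
  let cs := sequence.toList
  let half := PySem.Int.floordiv (cs.length : Int) 2
  (fpB_go cs (half + 1 - min_length).toNat min_length).map (fun pc => (String.mk pc.1, pc.2))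

-- ===== PRECONDITION & SPEC =====
-- Pre_ restricts to the natural domain min_length ≥ 0: for negative min_length the Python slice
-- s[i:i+length] runs through negative stop indices, and A counts the resulting empty-string patterns by
-- str.count while B's position grouping sees more of them — a degenerate corner outside the
-- function's purpose (pattern lengths are non-negative).
def Pre_find_repeating_patterns (sequence : String) (min_length : Int) : Prop := 0 ≤ min_length
instance (sequence : String) (min_length : Int) : Decidable (Pre_find_repeating_patterns sequence min_length) := by unfold Pre_find_repeating_patterns; infer_instance
def pvWitness_find_repeating_patterns : String × Int := ("abcabc", 2)

def Spec_find_repeating_patterns (sequence : String) (min_length : Int) (out : List (String × Int)) : Prop := out = find_repeating_patterns_alt sequence min_length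
instance (sequence : String) (min_length : Int) (out : List (String × Int)) : Decidable (Spec_find_repeating_patterns sequence min_length out) := by unfold Spec_find_repeating_patterns; infer_instance

-- ===== CLAIM (what is proved, stated in full; the proofs are below) =====
def Claim_equal_find_repeating_patterns : Prop := ∀ (sequence : String) (min_length : Int), Dom_find_repeating_patterns sequence min_length → Pre_find_repeating_patterns sequence min_length → Spec_find_repeating_patterns sequence min_length (find_repeating_patterns sequence min_length)

-- ===== LEMMAS AND PROOFS =====

-- greedy non-overlapping count of nonempty p in cs starting at position j (what str.count computes)
def gcnt (cs p : List Char) (j : Nat) : Nat :=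
  if h : cs.length < j + p.length ∨ p = [] then 0
  else if p.isPrefixOf (cs.drop j) then 1 + gcnt cs p (j + p.length) else gcnt cs p (j + 1)
  termination_by cs.length + 1 - j
  decreasing_by
  · have hp : 1 ≤ p.length := by
      rcases p with _ | ⟨a, t⟩
      · exact absurd rfl (by push_neg at h; exact h.2)
      · simp
    omega
  · omega

-- B's greedy fold over the (ascending) positions whose substring is a given pattern, as an Option-state
-- recursion so that A's absent-key start (none) and B's (0,0) start share one shape
def bsim (L : Int) : Option (Int × Int) → List Int → Option (Int × Int)
  | st, [] => st
  | st, i :: r =>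
    let cnx := st.getD (0, 0)
    if cnx.2 ≤ i then bsim L (some (cnx.1 + 1, i + L)) r else bsim L st r

-- the new (pattern, count) pairs A's inner loop appends, given the already-seen set
def newA (cs : List Char) (L : Int) (seen : PySem.Set (List Char)) : List Int → List (List Char × Int)
  | [] => []
  | i :: r =>
    if PySem.Set.contains seen (fpKey cs L i) then newA cs L seen r
    else if 1 < (PySem.Chars.count cs (fpKey cs L i) : Int) then
      (fpKey cs L i, (PySem.Chars.count cs (fpKey cs L i) : Int)) :: newA cs L (PySem.Set.add seen (fpKey cs L i)) r
    else newA cs L (PySem.Set.add seen (fpKey cs L i)) r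

-- first occurrences, in order, of patterns not yet seen
def ddp (seen : PySem.Set (List Char)) : List (List Char) → List (List Char)
  | [] => []
  | p :: r => if PySem.Set.contains seen p then ddp seen r else p :: ddp (PySem.Set.add seen p) r

lemma gcnt_stop (cs p : List Char) (j : Nat) (h : cs.length < j + p.length ∨ p = []) :
    gcnt cs p j = 0 := by
  rw [gcnt.eq_def, dif_pos h]

lemma gcnt_hit (cs p : List Char) (j : Nat) (hp : p ≠ []) (h1 : ¬ cs.length < j + p.length)
    (h2 : p.isPrefixOf (cs.drop j) = true) :
    gcnt cs p j = 1 + gcnt cs p (j + p.length) := by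
  rw [gcnt.eq_def, dif_neg (by tauto), if_pos h2]

lemma gcnt_miss (cs p : List Char) (j : Nat) (hp : p ≠ []) (h1 : ¬ cs.length < j + p.length)
    (h2 : ¬ p.isPrefixOf (cs.drop j) = true) :
    gcnt cs p j = gcnt cs p (j + 1) := by
  rw [gcnt.eq_def, dif_neg (by tauto), if_neg h2]

lemma go_spec (cs p : List Char) (hp : p ≠ []) :
    ∀ (fuel j : Nat) (acc : Nat), j ≤ cs.length → cs.length - j ≤ fuel →
      PySem.Chars.count.go p fuel (cs.drop j) acc = acc + gcnt cs p j := by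
  have hplen : 1 ≤ p.length := by
    rcases p with _ | ⟨a, t⟩
    · exact absurd rfl hp
    · simp
  intro fuel
  induction fuel with
  | zero =>
    intro j acc h1 h2
    have hj : j = cs.length := by omega
    have hnil : cs.drop j = [] := by simp [hj]
    rw [hnil, gcnt_stop cs p j (Or.inl (by omega))]
    simp [PySem.Chars.count.go]
  | succ fuel ih =>
    intro j acc h1 h2
    rcases hd : cs.drop j with _ | ⟨c, t⟩
    · have hj : j = cs.length := by
        have := cs.length_drop (i := j)
        rw [hd] at this
        simp at this; omega
      rw [gcnt_stop cs p j (Or.inl (by omega))]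
      simp [PySem.Chars.count.go]
    · have hjlt : j < cs.length := by
        by_contra hge
        rw [List.drop_eq_nil_of_le (by omega)] at hd
        exact absurd hd (by simp)
      by_cases hpre : p.isPrefixOf (c :: t) = true
      · have hpre' : p.isPrefixOf (cs.drop j) = true := by rw [hd]; exact hpre
        have hple : j + p.length ≤ cs.length := by
          have hlen := (List.isPrefixOf_iff_prefix.mp hpre').length_le
          rw [List.length_drop] at hlen
          omega
        rw [show PySem.Chars.count.go p (fuel + 1) (c :: t) acc
            = PySem.Chars.count.go p fuel (List.drop p.length (c :: t)) (acc + 1) from by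
          simp [PySem.Chars.count.go, hpre]]
        rw [show List.drop p.length (c :: t) = List.drop (j + p.length) cs from by
          rw [← hd, List.drop_drop]]
        rw [ih (j + p.length) (acc + 1) hple (by omega), gcnt_hit cs p j hp (by omega) hpre']
        omega
      · rw [show PySem.Chars.count.go p (fuel + 1) (c :: t) acc
            = PySem.Chars.count.go p fuel t acc from by
          simp [PySem.Chars.count.go, hpre]]
        have ht : t = List.drop (j + 1) cs := by
          rw [show (j + 1) = j + 1 from rfl, ← List.drop_drop, hd]
          rfl
        rw [show PySem.Chars.count.go p fuel t acc
            = PySem.Chars.count.go p fuel (List.drop (j + 1) cs) acc from by rw [← ht]]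
        rw [ih (j + 1) acc (by omega) (by omega)]
        have hpre2 : ¬ p.isPrefixOf (cs.drop j) = true := by rw [hd]; exact hpre
        by_cases hbound : cs.length < j + p.length
        · rw [gcnt_stop cs p j (Or.inl hbound), gcnt_stop cs p (j + 1) (Or.inl (by omega))]
        · rw [gcnt_miss cs p j hp hbound hpre2]

lemma count_eq_gcnt (cs p : List Char) (hp : p ≠ []) :
    PySem.Chars.count cs p = gcnt cs p 0 := by
  have h := go_spec cs p hp cs.length 0 0 (by omega) (by omega)
  rw [List.drop_zero] at h
  simpa [PySem.Chars.count, List.isEmpty_iff, hp] using h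

lemma foldA_eq (cs : List Char) (L : Int) :
    ∀ (l : List Int) (f0 : Bool) (seen : PySem.Set (List Char)) (pats : List (List Char × Int)),
      l.foldl (fpA_step cs L) (f0, seen, pats) =
        (f0 || !(newA cs L seen l).isEmpty, PySem.Set.update seen (l.map (fpKey cs L)), pats ++ newA cs L seen l) := by
  intro l
  induction l with
  | nil => intro f0 seen pats; simp [newA, PySem.Set.update]
  | cons i r ih =>
    intro f0 seen pats
    by_cases hm : fpKey cs L i ∈ seen
    · have hct : PySem.Set.contains seen (fpKey cs L i) = true :=
        (PySem.Set.contains_iff _ _).mpr hm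
      have hadd : PySem.Set.add seen (fpKey cs L i) = seen := by
        simp [PySem.Set.add, hm]
      have hstep : fpA_step cs L (f0, seen, pats) i = (f0, seen, pats) := by
        simp [fpA_step, hm]
      simp only [List.foldl_cons, hstep, ih, List.map_cons, PySem.Set.update_cons, hadd, newA, hct,
        if_true]
    · have hct : PySem.Set.contains seen (fpKey cs L i) = false := by
        rw [Bool.eq_false_iff]
        intro h; exact hm ((PySem.Set.contains_iff _ _).mp h)
      have hadd : PySem.Set.add seen (fpKey cs L i) = seen ++ [fpKey cs L i] := by
        simp [PySem.Set.add, hm]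
      by_cases hc : 1 < PySem.Chars.count cs (fpKey cs L i)
      · have hcI : (1 : Int) < (PySem.Chars.count cs (fpKey cs L i) : Int) := by exact_mod_cast hc
        have hstep : fpA_step cs L (f0, seen, pats) i =
            (true, PySem.Set.add seen (fpKey cs L i),
             pats ++ [(fpKey cs L i, (PySem.Chars.count cs (fpKey cs L i) : Int))]) := by
          simp [fpA_step, hm, hc, hcI]
        simp only [List.foldl_cons, hstep, ih, List.map_cons, PySem.Set.update_cons, newA, hct,
          Bool.false_eq_true, if_false, hcI, if_pos, Bool.true_or, List.isEmpty_cons,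
          Bool.not_false, Bool.or_true, List.append_assoc, List.singleton_append]
      · have hcI : ¬ (1 : Int) < (PySem.Chars.count cs (fpKey cs L i) : Int) := by exact_mod_cast hc
        have hstep : fpA_step cs L (f0, seen, pats) i =
            (f0, PySem.Set.add seen (fpKey cs L i), pats) := by
          simp [fpA_step, hm, hc, hcI]
        simp only [List.foldl_cons, hstep, ih, List.map_cons, PySem.Set.update_cons, newA, hct,
          Bool.false_eq_true, if_false, hcI]

lemma newA_eq (cs : List Char) (L : Int) :
    ∀ (l : List Int) (seen : PySem.Set (List Char)),
      newA cs L seen l = (ddp seen (l.map (fpKey cs L))).filterMap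
        (fun p => if 1 < (PySem.Chars.count cs p : Int) then some (p, (PySem.Chars.count cs p : Int)) else none) := by
  intro l
  induction l with
  | nil => intro seen; simp [newA, ddp]
  | cons i r ih =>
    intro seen
    simp only [newA, List.map_cons, ddp]
    by_cases hct : PySem.Set.contains seen (fpKey cs L i) = true
    · simp only [hct, if_true, ih]
    · rw [Bool.not_eq_true] at hct
      by_cases hc : 1 < PySem.Chars.count cs (fpKey cs L i)
      · have hcI : (1 : Int) < (PySem.Chars.count cs (fpKey cs L i) : Int) := by exact_mod_cast hc
        simp only [hct, Bool.false_eq_true, if_false, hcI, if_pos, ih, List.filterMap_cons]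
      · have hcI : ¬ (1 : Int) < (PySem.Chars.count cs (fpKey cs L i) : Int) := by exact_mod_cast hc
        simp only [hct, Bool.false_eq_true, if_false, ih, List.filterMap_cons]
        simp [hcI]

lemma update_eq_append_ddp : ∀ (l : List (List Char)) (seen : PySem.Set (List Char)),
    PySem.Set.update seen l = seen ++ ddp seen l := by
  intro l
  induction l with
  | nil => intro seen; simp [PySem.Set.update, ddp]
  | cons p r ih =>
    intro seen
    rw [PySem.Set.update_cons, ih]
    by_cases hm : p ∈ seen
    · have hct : PySem.Set.contains seen p = true := (PySem.Set.contains_iff _ _).mpr hm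
      simp [ddp, hct, PySem.Set.add, hm]
    · have hct : PySem.Set.contains seen p = false := by
        rw [Bool.eq_false_iff]; intro h; exact hm ((PySem.Set.contains_iff _ _).mp h)
      simp [ddp, hct, PySem.Set.add, hm]

lemma ofList_eq_ddp (l : List (List Char)) : PySem.Set.ofList l = ddp PySem.Set.empty l := by
  have h := update_eq_append_ddp l PySem.Set.empty
  rw [show (PySem.Set.empty : PySem.Set (List Char)) = [] from rfl] at h
  rw [PySem.Set.update_nil_left] at h
  simpa using h

lemma keys_insert_add (d : PySem.Dict (List Char) (List Int)) (k : List Char) (v : List Int) :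
    (d.insert k v).keys = PySem.Set.add d.keys k := by
  by_cases hc : d.contains k = true
  · rw [PySem.Dict.keys_insert_of_contains d v hc]
    have hmem : k ∈ d.keys := (PySem.Dict.contains_iff_mem_keys d k).mp hc
    simp [PySem.Set.add, hmem]
  · rw [PySem.Dict.keys_insert_of_not_contains d v (by simpa using hc)]
    have hmem : k ∉ d.keys := fun hmem => hc ((PySem.Dict.contains_iff_mem_keys d k).mpr hmem)
    simp [PySem.Set.add, hmem]

lemma keysG (cs : List Char) (L : Int) :
    ∀ (l : List Int) (d : PySem.Dict (List Char) (List Int)),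
      (l.foldl (fpGroup cs L) d).keys = PySem.Set.update d.keys (l.map (fpKey cs L)) := by
  intro l
  induction l with
  | nil => intro d; simp [PySem.Set.update]
  | cons i r ih =>
    intro d
    simp only [List.foldl_cons, List.map_cons, PySem.Set.update_cons]
    rw [show fpGroup cs L d i = d.insert (fpKey cs L i) (d.getD (fpKey cs L i) [] ++ [i]) from rfl]
    rw [ih, keys_insert_add]

lemma getD_group (cs : List Char) (L : Int) :
    ∀ (l : List Int) (d : PySem.Dict (List Char) (List Int)) (q : List Char),
      (l.foldl (fpGroup cs L) d).getD q [] = d.getD q [] ++ l.filter (fun i => fpKey cs L i == q) := by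
  intro l
  induction l with
  | nil => intro d q; simp
  | cons i r ih =>
    intro d q
    simp only [List.foldl_cons, List.filter_cons]
    rw [show fpGroup cs L d i = d.insert (fpKey cs L i) (d.getD (fpKey cs L i) [] ++ [i]) from rfl]
    rw [ih]
    by_cases hpq : fpKey cs L i = q
    · subst hpq
      rw [PySem.Dict.getD_eq_get?_getD, PySem.Dict.get?_insert_self]
      simp [PySem.Dict.getD_eq_get?_getD]
    · have hbeq : (fpKey cs L i == q) = false := by simp [hpq]
      rw [PySem.Dict.getD_eq_get?_getD, PySem.Dict.get?_insert_of_ne d _ (fun h => hpq h.symm)]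
      simp [hbeq, PySem.Dict.getD_eq_get?_getD]

-- B's greedy fold is bsim started from the explicit (0,0) state
lemma bsim_some (L : Int) :
    ∀ (pos : List Int) (st : Int × Int),
      bsim L (some st) pos
        = some (pos.foldl (fun st i => if st.2 ≤ i then (st.1 + 1, i + L) else st) st) := by
  intro pos
  induction pos with
  | nil => intro st; rfl
  | cons i r ih =>
    intro st
    simp only [bsim, Option.getD_some, List.foldl_cons]
    by_cases h : st.2 ≤ i
    · rw [if_pos h, if_pos h, ih]
    · rw [if_neg h, if_neg h, ih]

-- greedy state evolution over the matching positions from j computes the greedy count from j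
lemma bsim_spec (cs p : List Char) (hp : p ≠ []) :
    ∀ (fuel j : Nat) (c : Int) (nx : Nat), cs.length + 1 - j ≤ fuel →
      (bsim (p.length : Int) (some (c, (nx : Int)))
        ((PySem.List.pyRange (j : Int) ((cs.length : Int) - (p.length : Int) + 1)).filter
          (fun i => fpKey cs (p.length : Int) i == p))).map (fun st => st.1)
      = some (c + (gcnt cs p (max j nx) : Int)) := by
  have hplen : 1 ≤ p.length := by
    rcases p with _ | ⟨a, t⟩
    · exact absurd rfl hp
    · simp
  intro fuel
  induction fuel with
  | zero =>
    intro j c nx hfuel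
    rw [PySem.List.pyRange_one_eq_nil (by push_cast; omega)]
    rw [gcnt_stop cs p (max j nx) (Or.inl (by omega))]
    simp [bsim]
  | succ fuel ih =>
    intro j c nx hfuel
    by_cases hj : (cs.length : Int) - (p.length : Int) + 1 ≤ (j : Int)
    · rw [PySem.List.pyRange_one_eq_nil hj]
      rw [gcnt_stop cs p (max j nx) (Or.inl (by omega))]
      simp [bsim]
    · have hjn : j + p.length ≤ cs.length := by omega
      rw [PySem.List.pyRange_one_cons (by omega)]
      have hkey : fpKey cs ((p.length : Nat) : Int) ((j : Nat) : Int) = List.take p.length (List.drop j cs) := by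
        unfold fpKey
        exact PySem.List.slice_natCast_add cs j p.length
      rw [show ((j : Int) + 1) = (((j + 1 : Nat)) : Int) from by push_cast; ring]
      by_cases hmatch : List.take p.length (List.drop j cs) = p
      · have hpre : p <+: List.drop j cs := by
          rw [List.prefix_iff_eq_take, ← hmatch]
          congr 1
          rw [← hmatch]
          simp [List.length_take, List.length_drop]
        have hpreB : p.isPrefixOf (List.drop j cs) = true := List.isPrefixOf_iff_prefix.mpr hpre
        rw [List.filter_cons_of_pos (by simp [hkey, hmatch])]
        by_cases hle : nx ≤ j
        · rw [show bsim (p.length : Int) (some (c, (nx : Int)))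
                ((j : Int) :: (PySem.List.pyRange ((j + 1 : Nat) : Int) ((cs.length : Int) - (p.length : Int) + 1)).filter
                  (fun i => fpKey cs (p.length : Int) i == p))
              = bsim (p.length : Int) (some (c + 1, ((j + p.length : Nat) : Int)))
                ((PySem.List.pyRange ((j + 1 : Nat) : Int) ((cs.length : Int) - (p.length : Int) + 1)).filter
                  (fun i => fpKey cs (p.length : Int) i == p)) from by
            simp only [bsim, Option.getD_some]
            rw [if_pos (by exact_mod_cast hle)]
            congr 2]
          rw [ih (j + 1) (c + 1) (j + p.length) (by omega)]
          rw [show max (j + 1) (j + p.length) = j + p.length from by omega,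
              show max j nx = j from by omega,
              gcnt_hit cs p j hp (by omega) hpreB]
          congr 1
          push_cast; ring
        · rw [show bsim (p.length : Int) (some (c, (nx : Int)))
                ((j : Int) :: (PySem.List.pyRange ((j + 1 : Nat) : Int) ((cs.length : Int) - (p.length : Int) + 1)).filter
                  (fun i => fpKey cs (p.length : Int) i == p))
              = bsim (p.length : Int) (some (c, (nx : Int)))
                ((PySem.List.pyRange ((j + 1 : Nat) : Int) ((cs.length : Int) - (p.length : Int) + 1)).filter
                  (fun i => fpKey cs (p.length : Int) i == p)) from by
            simp only [bsim, Option.getD_some]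
            rw [if_neg (by exact_mod_cast hle)]]
          rw [ih (j + 1) c nx (by omega)]
          rw [show max (j + 1) nx = nx from by omega, show max j nx = nx from by omega]
      · rw [List.filter_cons_of_neg (by simp [hkey, hmatch])]
        rw [ih (j + 1) c nx (by omega)]
        by_cases hx : nx ≤ j
        · rw [show max (j + 1) nx = j + 1 from by omega, show max j nx = j from by omega]
          have hnpre : ¬ p.isPrefixOf (List.drop j cs) = true := by
            rw [List.isPrefixOf_iff_prefix, List.prefix_iff_eq_take]
            intro hcontra
            apply hmatch
            rw [hcontra]
            congr 1
            simp [List.length_take, List.length_drop]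
            omega
          rw [gcnt_miss cs p j hp (by omega) hnpre]
        · rw [show max (j + 1) nx = nx from by omega, show max j nx = nx from by omega]

-- the L = 0 case: every position matches the empty pattern and is taken
lemma bsim0_spec (cs : List Char) :
    ∀ (fuel j : Nat) (c : Int) (nx : Nat), nx ≤ j → cs.length + 1 - j ≤ fuel →
      (bsim 0 (some (c, (nx : Int))) (PySem.List.pyRange (j : Int) ((cs.length : Int) + 1))).map (fun st => st.1)
      = some (c + ((cs.length + 1 - j : Nat) : Int)) := by
  intro fuel
  induction fuel with
  | zero =>
    intro j c nx hle hfuel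
    rw [PySem.List.pyRange_one_eq_nil (by push_cast; omega)]
    simp [bsim]
    omega
  | succ fuel ih =>
    intro j c nx hle hfuel
    by_cases hj : (cs.length : Int) + 1 ≤ (j : Int)
    · rw [PySem.List.pyRange_one_eq_nil hj]
      simp [bsim]
      omega
    · rw [PySem.List.pyRange_one_cons (by omega)]
      rw [show bsim 0 (some (c, (nx : Int))) ((j : Int) :: PySem.List.pyRange ((j : Int) + 1) ((cs.length : Int) + 1))
          = bsim 0 (some (c + 1, ((j : Nat) : Int))) (PySem.List.pyRange ((j : Int) + 1) ((cs.length : Int) + 1)) from by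
        simp only [bsim, Option.getD_some]
        rw [if_pos (by exact_mod_cast hle)]
        congr 2]
      rw [show ((j : Int) + 1) = (((j + 1 : Nat)) : Int) from by push_cast; ring]
      rw [ih (j + 1) (c + 1) j (by omega) (by omega)]
      congr 1
      push_cast
      omega

lemma fpKey_zero (cs : List Char) (aN : Nat) : fpKey cs 0 ((aN : Nat) : Int) = [] := by
  have h := PySem.List.slice_natCast_add cs aN 0
  simpa [fpKey] using h

-- value lemma: the greedy count of every key's position list is str.count of that key
lemma value_lemma (cs : List Char) (L : Int) (hL : 0 ≤ L) (q : List Char)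
    (hq : q ∈ ((PySem.List.pyRange 0 ((cs.length : Int) - L + 1) 1).foldl (fpGroup cs L) PySem.Dict.empty).keys) :
    fpGreedy L (((PySem.List.pyRange 0 ((cs.length : Int) - L + 1) 1).foldl (fpGroup cs L) PySem.Dict.empty).getD q [])
      = (PySem.Chars.count cs q : Int) := by
  have h0 : ∀ i ∈ PySem.List.pyRange 0 ((cs.length : Int) - L + 1) 1, (0:Int) ≤ i :=
    fun i hi => (PySem.List.mem_pyRange_one.mp hi).1
  have hkeys : ((PySem.List.pyRange 0 ((cs.length : Int) - L + 1) 1).foldl (fpGroup cs L) PySem.Dict.empty).keys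
      = PySem.Set.ofList ((PySem.List.pyRange 0 ((cs.length : Int) - L + 1) 1).map (fpKey cs L)) := by
    rw [keysG cs L, PySem.Dict.keys_empty, PySem.Set.update_nil_left]
  rw [hkeys] at hq
  obtain ⟨i0, hi0, hkey0⟩ := List.mem_map.mp ((PySem.Set.mem_ofList _ _).mp hq)
  have hpos := getD_group cs L (PySem.List.pyRange 0 ((cs.length : Int) - L + 1) 1) PySem.Dict.empty q
  rw [show (PySem.Dict.empty : PySem.Dict (List Char) (List Int)).getD q [] = [] from rfl,
      List.nil_append] at hpos
  rw [hpos] at *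
  have hm0 : i0 ∈ (PySem.List.pyRange 0 ((cs.length : Int) - L + 1) 1).filter (fun i => fpKey cs L i == q) :=
    List.mem_filter.mpr ⟨hi0, by simp [hkey0]⟩
  obtain ⟨i0N, rfl⟩ := Int.eq_ofNat_of_zero_le (h0 i0 hi0)
  obtain ⟨LN, rfl⟩ := Int.eq_ofNat_of_zero_le hL
  have hi0b : (i0N : Int) < (cs.length : Int) - (LN : Int) + 1 := (PySem.List.mem_pyRange_one.mp hi0).2
  have hkey0' : List.take LN (List.drop i0N cs) = q := by
    rw [← hkey0]
    exact (PySem.List.slice_natCast_add cs i0N LN).symm ▸ rfl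
  -- fpGreedy over the filtered positions via bsim
  have hgr : ∀ pos : List Int,
      (bsim (LN : Int) (some ((0:Int), (0:Int))) pos).map (fun st => st.1) = some (fpGreedy (LN : Int) pos) := by
    intro pos
    rw [bsim_some]
    rfl
  rcases Nat.eq_zero_or_pos LN with hLN | hLN
  · -- L = 0 : the only key is [] and every position matches it
    subst hLN
    have hqnil : q = [] := by rw [← hkey0']; simp
    subst hqnil
    simp only [Nat.cast_zero] at hgr ⊢
    have hfl_all : (PySem.List.pyRange 0 ((cs.length : Int) - 0 + 1) 1).filter
        (fun i => fpKey cs (0 : Int) i == ([] : List Char)) = PySem.List.pyRange 0 ((cs.length : Int) + 1) 1 := by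
      rw [show (cs.length : Int) - 0 + 1 = (cs.length : Int) + 1 from by ring]
      rw [List.filter_eq_self]
      intro a ha
      obtain ⟨aN, rfl⟩ := Int.eq_ofNat_of_zero_le (PySem.List.mem_pyRange_one.mp ha).1
      simp [fpKey_zero]
    rw [hfl_all]
    have hspec := bsim0_spec cs (cs.length + 1) 0 0 0 (by omega) (by omega)
    simp only [Nat.cast_zero] at hspec
    rw [hgr (PySem.List.pyRange 0 ((cs.length : Int) + 1) 1)] at hspec
    have : fpGreedy 0 (PySem.List.pyRange 0 ((cs.length : Int) + 1) 1) = ((cs.length + 1 : Nat) : Int) := by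
      injection hspec with h
      rw [h]; push_cast; ring
    rw [this]
    simp [PySem.Chars.count]
  · -- L ≥ 1 : q is a length-L substring; the greedy count over its positions is str.count
    have hbound : i0N + LN ≤ cs.length := by omega
    have hqlen : q.length = LN := by
      rw [← hkey0']
      simp [List.length_take, List.length_drop]
      omega
    have hqne : q ≠ [] := by
      intro h
      rw [h] at hqlen
      simp at hqlen
      omega
    have hspec := bsim_spec cs q hqne (cs.length + 1) 0 0 0 (by omega)
    rw [hqlen] at hspec
    rw [show (((0:Nat)) : Int) = (0 : Int) from rfl] at hspec
    simp only [Nat.max_self, Nat.zero_add, zero_add] at hspec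
    rw [hgr ((PySem.List.pyRange 0 ((cs.length : Int) - (LN : Int) + 1) 1).filter
      (fun i => fpKey cs ((LN : Nat) : Int) i == q))] at hspec
    injection hspec with h
    rw [h, count_eq_gcnt cs q hqne]

-- B's result-collecting fold, in filterMap form
lemma collectG (L : Int) :
    ∀ (items : List (List Char × List Int)) (res0 : List (List Char × Int)),
      items.foldl (fun res pv =>
          let c := fpGreedy L pv.2
          if 1 < c then res ++ [(pv.1, c)] else res) res0 =
        res0 ++ items.filterMap (fun pv =>
          if 1 < fpGreedy L pv.2 then some (pv.1, fpGreedy L pv.2) else none) := by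
  intro items
  induction items with
  | nil => intro res0; simp
  | cons pv r ih =>
    intro res0
    simp only [List.foldl_cons, List.filterMap_cons]
    by_cases h : 1 < fpGreedy L pv.2
    · simp [h, ih]
    · simp [h, ih]

-- per-length equality: B's repeats_at equals the list A's inner loop appends
lemma repeats_eq (cs : List Char) (L : Int) (hL : 0 ≤ L) :
    fpRepeatsAt cs L = newA cs L PySem.Set.empty (PySem.List.pyRange 0 ((cs.length : Int) - L + 1) 1) := by
  unfold fpRepeatsAt
  set d := (PySem.List.pyRange 0 ((cs.length : Int) - L + 1) 1).foldl (fpGroup cs L) PySem.Dict.empty with hd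
  have hkeys : d.keys = PySem.Set.ofList ((PySem.List.pyRange 0 ((cs.length : Int) - L + 1) 1).map (fpKey cs L)) := by
    rw [hd, keysG cs L, PySem.Dict.keys_empty, PySem.Set.update_nil_left]
  have hnodup : d.keys.Nodup := by
    rw [hkeys]; exact PySem.Set.nodup_ofList _
  have hitems := PySem.Dict.items_eq_map_keys d hnodup ([] : List Int)
  rw [collectG, List.nil_append, hitems, List.filterMap_map]
  rw [List.filterMap_congr (g := fun p => if 1 < (PySem.Chars.count cs p : Int)
      then some (p, (PySem.Chars.count cs p : Int)) else none) ?_]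
  · rw [hkeys, ofList_eq_ddp, newA_eq]
  · intro k hk
    have hv := value_lemma cs L hL k (hd ▸ hk)
    simp only [Function.comp]
    rw [← hd] at hv
    rw [hv]

-- A's while loop returns its accumulator untouched once found is false
lemma fpA_loop_false (cs : List Char) (half : Int) :
    ∀ (fuel : Nat) (L : Int) (pats : List (List Char × Int)),
      fpA_loop cs half fuel L false pats = pats := by
  intro fuel L pats
  cases fuel with
  | zero => rfl
  | succ n => simp [fpA_loop]

lemma loop_eq (cs : List Char) (half : Int) :
    ∀ (fuel : Nat) (L : Int) (pats : List (List Char × Int)), 0 ≤ L →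
      fuel = (half + 1 - L).toNat →
      fpA_loop cs half fuel L true pats = pats ++ fpB_go cs fuel L := by
  intro fuel
  induction fuel with
  | zero => intro L pats _ _; simp [fpA_loop, fpB_go]
  | succ n ih =>
    intro L pats hL hfuel
    have hLhalf : L ≤ half := by omega
    simp only [fpA_loop, fpB_go, hLhalf, decide_true, Bool.and_self, if_true]
    rw [foldA_eq cs L]
    rw [repeats_eq cs L hL]
    set rep := newA cs L PySem.Set.empty (PySem.List.pyRange 0 ((cs.length : Int) - L + 1) 1) with hrep
    cases hemp : rep.isEmpty with
    | true =>
      have hnil : rep = [] := List.isEmpty_iff.mp hemp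
      simp [hnil, fpA_loop_false]
    | false =>
      simp only [hemp, Bool.not_false, Bool.false_eq_true, if_false, Bool.false_or]
      rw [ih (L + 1) (pats ++ rep) (by omega) (by omega)]
      rw [List.append_assoc]

-- ===== VERDICT (by name: the statement is the Claim_ definition above) =====
theorem find_repeating_patterns_spec : Claim_equal_find_repeating_patterns := by
  intro sequence min_length _ hpre
  unfold Spec_find_repeating_patterns find_repeating_patterns find_repeating_patterns_alt
  simp only []
  rw [show (PySem.Int.floordiv (sequence.toList.length : Int) 2 - min_length + 1).toNat
      = (PySem.Int.floordiv (sequence.toList.length : Int) 2 + 1 - min_length).toNat from by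
    congr 1; ring]
  rw [loop_eq _ _ _ _ _ hpre (by ring_nf)]
  simp
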